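-- pv_equiv track=rewrite | github.com/koteos/RANDOM | funcion_raiz_cuadrada.py | cuadrado
-- ===== SOURCE A (Python) =====
-- def cuadrado(x):
--     """Returns the square root of x, if x is a perfect square.
--     Prints an error message and returns None otherwise"""
--     ans = 0
--     if x > 0:
--         while ans*ans < x: ans = ans + 1
--         if ans*ans != x:
--             print (x, 'is not a perfect square')
--             return None
--         else: return ans
--     else:
--         print (x, 'is a negative number')
--         return None
-- ===== SOURCE B (Python) =====
-- def cuadrado(x):
--     """Returns the square root of x, if x is a perfect square.
--     Prints an error message and returns None otherwise"""
--     if x > 0: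
--         # sum-of-odd-numbers identity: 1+3+...+(2k-1) = k*k
--         r = x
--         odd = 1
--         k = 0
--         while r > 0:
--             r -= odd
--             odd += 2
--             k += 1
--         if r == 0:
--             return k
--         print(x, 'is not a perfect square')
--         return None
--     else:
--         print(x, 'is a negative number')
--         return None
-- ===== Notes on version B (the rewrite author's own statement) =====
-- stated objective: alternative
-- what changed: Replaces the candidate-squaring loop (increment ans while ans*ans < x, then test ans*ans == x) with a subtract-consecutive-odd-numbers loop that maintains a remainder and never multiplies, detecting perfect squares via 1+3+...+(2k-1) = k*k.
import Mathlib
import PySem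

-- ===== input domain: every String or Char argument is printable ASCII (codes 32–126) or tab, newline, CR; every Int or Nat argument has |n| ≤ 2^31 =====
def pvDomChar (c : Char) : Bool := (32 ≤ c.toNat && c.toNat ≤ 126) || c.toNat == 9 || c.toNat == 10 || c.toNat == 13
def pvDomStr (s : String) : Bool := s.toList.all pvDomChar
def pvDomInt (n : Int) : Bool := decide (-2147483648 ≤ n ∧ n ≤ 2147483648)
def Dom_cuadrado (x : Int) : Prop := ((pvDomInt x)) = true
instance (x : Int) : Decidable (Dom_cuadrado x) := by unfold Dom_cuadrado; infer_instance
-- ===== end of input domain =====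

-- B detects perfect squares by subtracting consecutive odd numbers (1+3+...+(2k-1)=k*k)
-- instead of incrementing a candidate and squaring it; return value only (prints not modelled).

-- ===== PORT A =====
-- while ans*ans < x: ans = ans + 1   (fuel = x.toNat bounds the iterations; loop always stops earlier)
def cuadradoLoop (fuel : Nat) (ans x : Int) : Int :=
  match fuel with
  | 0 => ans
  | f + 1 => if ans * ans < x then cuadradoLoop f (ans + 1) x else ans

def cuadrado (x : Int) : Option Int :=
  if x > 0 then
    let ans := cuadradoLoop x.toNat 0 x
    if ans * ans ≠ x then none else some ans
  else none

-- ===== PORT B =====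
-- while r > 0: r -= odd; odd += 2; k += 1   (same fuel bound)
def cuadradoAltLoop (fuel : Nat) (r odd k : Int) : Int × Int :=
  match fuel with
  | 0 => (r, k)
  | f + 1 => if r > 0 then cuadradoAltLoop f (r - odd) (odd + 2) (k + 1) else (r, k)

def cuadrado_alt (x : Int) : Option Int :=
  if x > 0 then
    let p := cuadradoAltLoop x.toNat x 1 0
    if p.1 = 0 then some p.2 else none
  else none

-- ===== PRECONDITION & SPEC =====
def Spec_cuadrado (x : Int) (out : Option Int) : Prop := out = cuadrado_alt x
instance (x : Int) (out : Option Int) : Decidable (Spec_cuadrado x out) := by unfold Spec_cuadrado; infer_instance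

-- ===== CLAIM (what is proved, stated in full; the proofs are below) =====
def Claim_equal_cuadrado : Prop := ∀ (x : Int), Dom_cuadrado x → Spec_cuadrado x (cuadrado x)

-- ===== LEMMAS AND PROOFS =====
-- State correspondence: B's state (r, odd, k) is (x - k*k, 2*k+1, k) for A's counter k.
theorem cuadrado_loops_agree (fuel : Nat) (ans x : Int) :
    cuadradoAltLoop fuel (x - ans * ans) (2 * ans + 1) ans
      = (x - cuadradoLoop fuel ans x * cuadradoLoop fuel ans x, cuadradoLoop fuel ans x) := by
  induction fuel generalizing ans with
  | zero => simp [cuadradoAltLoop, cuadradoLoop]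
  | succ f ih =>
    simp only [cuadradoAltLoop, cuadradoLoop]
    by_cases h : ans * ans < x
    · rw [if_pos h, if_pos (by omega)]
      have e1 : x - ans * ans - (2 * ans + 1) = x - (ans + 1) * (ans + 1) := by ring
      have e2 : 2 * ans + 1 + 2 = 2 * (ans + 1) + 1 := by ring
      rw [e1, e2, ih (ans + 1)]
    · rw [if_neg h, if_neg (by omega)]

-- ===== VERDICT (by name: the statement is the Claim_ definition above) =====
theorem cuadrado_spec : Claim_equal_cuadrado := by
  intro x _
  unfold Spec_cuadrado cuadrado cuadrado_alt
  by_cases hx : x > 0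
  · rw [if_pos hx, if_pos hx]
    have h := cuadrado_loops_agree x.toNat 0 x
    norm_num at h
    set a := cuadradoLoop x.toNat 0 x with ha
    show (if a * a ≠ x then none else some a)
        = (let p := cuadradoAltLoop x.toNat x 1 0; if p.1 = 0 then some p.2 else none)
    rw [h]
    by_cases he : a * a = x
    · simp [he]
    · rw [if_pos (by omega), if_neg (by omega)]
  · rw [if_neg hx, if_neg hx]
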